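-- pv_equiv track=rewrite | github.com/effoT/codingbat-py | String-3.py | sameEnds
-- ===== SOURCE A (Python) =====
-- def sameEnds(text):
--     def is_A_in_B_twice(a, b):
--         if not a:
--             return False
--         counter = 0
--         i = 0
--         while i < (len(b)):
--             if a == b[i:i + len(a)]:
--                 counter += 1
--                 i += len(a)
--                 continue
--             i += 1
--         if counter < 2:
--             return False
--         return True
--     max_counter = 0
--     max_text = ""
--     for o in range(len(text) + 1):
--         if is_A_in_B_twice(text[0:o], text) == True:
--             if max_counter < len(text[0:o]):
--                 max_counter = len(text[0:o])
--                 max_text = text[0:o]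
--     return max_text
-- ===== SOURCE B (Python) =====
-- def sameEnds(text):
--     for l in range(len(text) // 2, 0, -1):
--         if text[:l] in text[l:]:
--             return text[:l]
--     return ""
-- ===== Notes on version B (the rewrite author's own statement) =====
-- stated objective: faster
-- what changed: Instead of scanning every prefix length upward and counting occurrences with a hand-written greedy while-loop, B scans candidate lengths downward from len(text)//2 (no longer prefix can fit twice) and returns the first prefix found again in the rest of the text via Python's substring test, exiting early.
import Mathlib
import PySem

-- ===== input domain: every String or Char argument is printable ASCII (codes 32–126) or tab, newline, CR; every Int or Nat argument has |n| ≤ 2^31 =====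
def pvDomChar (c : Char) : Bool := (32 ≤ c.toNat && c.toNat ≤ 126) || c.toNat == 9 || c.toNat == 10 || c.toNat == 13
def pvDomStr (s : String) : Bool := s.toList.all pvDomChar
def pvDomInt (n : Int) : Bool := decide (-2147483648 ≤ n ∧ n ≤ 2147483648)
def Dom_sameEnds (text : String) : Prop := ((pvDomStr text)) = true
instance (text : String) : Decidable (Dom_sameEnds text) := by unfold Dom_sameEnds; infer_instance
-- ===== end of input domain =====

-- B scans candidate lengths downward from len(text)//2 and returns the first prefix that
-- re-occurs in the rest of the text (Python's `in`), instead of A's upward scan over all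
-- prefixes with a hand-written greedy counting loop.

-- ===== PORT A =====
-- A's inner while loop; fuel = len(b) suffices: i strictly increases each iteration
-- whenever a ≠ [] (the only way the loop is reached, thanks to the `if not a` guard).
-- Slices b[i:i+len(a)] with nonnegative bounds are (b.drop i).take a.length (exact).
def twLoop (a b : List Char) : Nat → Nat → Nat → Nat
  | 0, _, c => c
  | fuel + 1, i, c =>
    if i < b.length then
      if a = (b.drop i).take a.length then twLoop a b fuel (i + a.length) (c + 1)
      else twLoop a b fuel (i + 1) c
    else c

def isTwice (a b : List Char) : Bool :=
  if a = [] then false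
  else if twLoop a b b.length 0 0 < 2 then false else true

def sameEnds (text : String) : String :=
  let t := text.toList
  let r := (List.range (t.length + 1)).foldl
    (fun (s : Nat × List Char) o =>
      if isTwice (t.take o) t = true then
        if s.1 < (t.take o).length then ((t.take o).length, t.take o) else s
      else s) (0, [])
  String.mk r.2

-- ===== PORT B =====
-- countdown loop `for l in range(len(text)//2, 0, -1)` with early return
def bLoop (t : List Char) : Nat → List Char
  | 0 => []
  | l + 1 =>
    if PySem.Chars.isIn (t.take (l + 1)) (t.drop (l + 1)) then t.take (l + 1)
    else bLoop t l

def sameEnds_alt (text : String) : String :=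
  String.mk (bLoop text.toList (text.toList.length / 2))

-- ===== PRECONDITION & SPEC =====
def Spec_sameEnds (text : String) (out : String) : Prop := out = sameEnds_alt text
instance (text : String) (out : String) : Decidable (Spec_sameEnds text out) := by unfold Spec_sameEnds; infer_instance

-- ===== CLAIM (what is proved, stated in full; the proofs are below) =====
def Claim_equal_sameEnds : Prop := ∀ (text : String), Dom_sameEnds text → Spec_sameEnds text (sameEnds text)

-- ===== LEMMAS AND PROOFS =====

-- the counter never decreases
theorem tw_ge (a b : List Char) : ∀ fuel i c, c ≤ twLoop a b fuel i c := by
  intro fuel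
  induction fuel with
  | zero => intro i c; simp [twLoop]
  | succ f ih =>
    intro i c
    simp only [twLoop]
    split
    · split
      · exact le_trans (Nat.le_succ c) (ih _ _)
      · exact ih _ _
    · exact le_rfl

-- an occurrence of a at any j ≥ i forces one more count
theorem tw_complete (a b : List Char) (ha : a ≠ []) :
    ∀ fuel i c j, b.length - i ≤ fuel → i ≤ j → a <+: b.drop j →
      c + 1 ≤ twLoop a b fuel i c := by
  intro fuel
  induction fuel with
  | zero =>
    intro i c j hf hij hpre
    have h1 : a.length ≤ (b.drop j).length := hpre.length_le
    have h2 : 1 ≤ a.length := List.length_pos_iff.mpr ha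
    rw [List.length_drop] at h1
    omega
  | succ f ih =>
    intro i c j hf hij hpre
    have h1 : a.length ≤ (b.drop j).length := hpre.length_le
    have h2 : 1 ≤ a.length := List.length_pos_iff.mpr ha
    rw [List.length_drop] at h1
    have hib : i < b.length := by omega
    simp only [twLoop, hib, if_true]
    by_cases hm : a = (b.drop i).take a.length
    · rw [if_pos hm]
      exact tw_ge a b f _ (c + 1)
    · rw [if_neg hm]
      have hne : i ≠ j := fun he => hm (he ▸ List.prefix_iff_eq_take.mp hpre)
      exact ih (i + 1) c j (by omega) (by omega) hpre

-- the count exceeds c only if a occurs at some j ≥ i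
theorem tw_sound (a b : List Char) :
    ∀ fuel i c, c + 1 ≤ twLoop a b fuel i c → ∃ j, i ≤ j ∧ a <+: b.drop j := by
  intro fuel
  induction fuel with
  | zero => intro i c h; simp only [twLoop] at h; omega
  | succ f ih =>
    intro i c h
    simp only [twLoop] at h
    by_cases hib : i < b.length
    · simp only [hib, if_true] at h
      by_cases hm : a = (b.drop i).take a.length
      · exact ⟨i, le_rfl, List.prefix_iff_eq_take.mpr hm⟩
      · rw [if_neg hm] at h
        obtain ⟨j, hj, hpre⟩ := ih (i + 1) c h
        exact ⟨j, by omega, hpre⟩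
    · simp only [hib, if_false] at h; omega

theorem take_ne_nil' (t : List Char) (l : Nat) (h1 : 1 ≤ l) (h2 : l ≤ t.length) :
    t.take l ≠ [] := by
  intro h
  have h3 : (t.take l).length = l := by rw [List.length_take]; omega
  rw [h] at h3
  simp at h3
  omega

-- characterisation of A's is_A_in_B_twice on the prefix of length l
theorem isTwice_iff (t : List Char) (l : Nat) (h1 : 1 ≤ l) (h2 : l ≤ t.length) :
    isTwice (t.take l) t = true ↔ ∃ j, l ≤ j ∧ t.take l <+: t.drop j := by
  have ha : t.take l ≠ [] := take_ne_nil' t l h1 h2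
  have halen : (t.take l).length = l := by rw [List.length_take]; omega
  obtain ⟨m, hm⟩ : ∃ m, t.length = m + 1 := ⟨t.length - 1, by omega⟩
  have hstep : twLoop (t.take l) t t.length 0 0 = twLoop (t.take l) t m l 1 := by
    rw [hm]
    simp only [twLoop, List.drop_zero, halen]
    rw [if_pos (show 0 < t.length from by omega)]
    norm_num
  constructor
  · intro h
    unfold isTwice at h
    rw [if_neg ha] at h
    split at h
    · exact absurd h (by simp)
    · rename_i hcnt
      push_neg at hcnt
      rw [hstep] at hcnt
      exact tw_sound (t.take l) t m l 1 hcnt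
  · intro ⟨j, hj, hpre⟩
    unfold isTwice
    rw [if_neg ha, hstep]
    have : 1 + 1 ≤ twLoop (t.take l) t m l 1 :=
      tw_complete (t.take l) t ha m l 1 j (by omega) hj hpre
    rw [if_neg (by omega)]

-- the best (longest) qualifying prefix length among o < k
def bestA (t : List Char) : Nat → Nat
  | 0 => 0
  | k + 1 => if isTwice (t.take k) t = true then k else bestA t k

theorem bestA_cases (t : List Char) :
    ∀ k, bestA t k = 0 ∨ (bestA t k < k ∧ isTwice (t.take (bestA t k)) t = true) := by
  intro k
  induction k with
  | zero => left; rfl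
  | succ k ih =>
    simp only [bestA]
    by_cases h : isTwice (t.take k) t = true
    · rw [if_pos h]
      rcases Nat.eq_zero_or_pos k with hk | hk
      · left; exact hk
      · right; exact ⟨by omega, h⟩
    · rw [if_neg h]
      rcases ih with h0 | ⟨hlt, hq⟩
      · left; exact h0
      · right; exact ⟨by omega, hq⟩

theorem bestA_max (t : List Char) :
    ∀ k l, bestA t k < l → l < k → isTwice (t.take l) t = false := by
  intro k
  induction k with
  | zero => intro l _ h; omega
  | succ k ih =>
    intro l hgt hlt
    simp only [bestA] at hgt
    by_cases h : isTwice (t.take k) t = true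
    · rw [if_pos h] at hgt
      omega
    · rw [if_neg h] at hgt
      rcases Nat.lt_or_ge l k with h' | h'
      · exact ih l hgt h'
      · have : l = k := by omega
        subst this
        simpa using h

-- A's fold computes (bestA, its prefix)
theorem foldA (t : List Char) :
    ∀ k, k ≤ t.length + 1 →
      (List.range k).foldl
        (fun (s : Nat × List Char) o =>
          if isTwice (t.take o) t = true then
            if s.1 < (t.take o).length then ((t.take o).length, t.take o) else s
          else s) (0, []) = (bestA t k, t.take (bestA t k)) := by
  intro k
  induction k with
  | zero => intro _; simp [bestA]
  | succ k ih =>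
    intro hk
    rw [List.range_succ, List.foldl_append, ih (by omega)]
    simp only [List.foldl_cons, List.foldl_nil]
    have hlen : (t.take k).length = k := by rw [List.length_take]; omega
    by_cases h : isTwice (t.take k) t = true
    · have hk1 : 1 ≤ k := by
        by_contra hc
        have hk0 : k = 0 := by omega
        rw [hk0] at h
        simp [isTwice] at h
      have hblt : bestA t k < k := by
        rcases bestA_cases t k with h0 | ⟨hlt, _⟩
        · omega
        · exact hlt
      simp [h, hlen, hblt, bestA]
    · simp [h, bestA]

-- B's countdown loop returns the prefix of the best length, given maximality facts
theorem bLoop_eq (t : List Char) :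
    ∀ L M, M ≤ L →
      (M = 0 ∨ PySem.Chars.isIn (t.take M) (t.drop M) = true) →
      (∀ l, M < l → l ≤ L → PySem.Chars.isIn (t.take l) (t.drop l) = false) →
      bLoop t L = t.take M := by
  intro L
  induction L with
  | zero =>
    intro M hM _ _
    have : M = 0 := by omega
    subst this
    simp [bLoop]
  | succ L ih =>
    intro M hM hQ hmax
    by_cases h : PySem.Chars.isIn (t.take (L + 1)) (t.drop (L + 1)) = true
    · have : M = L + 1 := by
        by_contra hc
        have := hmax (L + 1) (by omega) le_rfl
        rw [h] at this
        exact absurd this (by simp)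
      subst this
      simp [bLoop, h]
    · have hM' : M ≤ L := by
        rcases Nat.lt_or_ge M (L + 1) with h' | h'
        · omega
        · have : M = L + 1 := by omega
          subst this
          rcases hQ with h0 | hq
          · omega
          · exact absurd hq h
      simp only [bLoop, h, if_false, Bool.false_eq_true]
      exact ih M hM' hQ (fun l hl hl' => hmax l hl (by omega))

-- Python's `sub in s` on the suffix, characterised as an occurrence at j ≥ l
theorem isIn_iff (t : List Char) (l : Nat) :
    PySem.Chars.isIn (t.take l) (t.drop l) = true ↔
      ∃ j, l ≤ j ∧ t.take l <+: t.drop j := by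
  rw [← PySem.Chars.exists_prefix_drop_iff_isIn]
  constructor
  · intro ⟨j, hpre⟩
    rw [List.drop_drop] at hpre
    exact ⟨l + j, by omega, hpre⟩
  · intro ⟨j, hj, hpre⟩
    refine ⟨j - l, ?_⟩
    rw [List.drop_drop, show l + (j - l) = j from by omega]
    exact hpre

-- a qualifying length fits twice in the text
theorem qual_le_half (t : List Char) (l : Nat) (h1 : 1 ≤ l) (h2 : l ≤ t.length)
    (h : ∃ j, l ≤ j ∧ t.take l <+: t.drop j) : l ≤ t.length / 2 := by
  obtain ⟨j, hj, hpre⟩ := h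
  have hlen : (t.take l).length ≤ (t.drop j).length := hpre.length_le
  rw [List.length_take, List.length_drop] at hlen
  omega

-- the two ports agree at the list level
theorem main_eq (t : List Char) :
    ((List.range (t.length + 1)).foldl
      (fun (s : Nat × List Char) o =>
        if isTwice (t.take o) t = true then
          if s.1 < (t.take o).length then ((t.take o).length, t.take o) else s
        else s) (0, [])).2 = bLoop t (t.length / 2) := by
  rw [foldA t (t.length + 1) le_rfl]
  set n := t.length with hn
  set M := bestA t (n + 1) with hM
  have hMfacts := bestA_cases t (n + 1)
  have hMle : M ≤ n := by rcases hMfacts with h | ⟨h, _⟩ <;> omega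
  have hMmax := bestA_max t (n + 1)
  have hBQ : M = 0 ∨ PySem.Chars.isIn (t.take M) (t.drop M) = true := by
    rcases hMfacts with h | ⟨_, hq⟩
    · left; exact h
    · rcases Nat.eq_zero_or_pos M with h0 | h0
      · left; exact h0
      · right
        exact (isIn_iff t M).mpr ((isTwice_iff t M h0 hMle).mp hq)
  have hMhalf : M ≤ n / 2 := by
    rcases hMfacts with h | ⟨_, hq⟩
    · omega
    · rcases Nat.eq_zero_or_pos M with h0 | h0
      · omega
      · exact qual_le_half t M h0 hMle ((isTwice_iff t M h0 hMle).mp hq)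
  have hBmax : ∀ l, M < l → l ≤ n / 2 → PySem.Chars.isIn (t.take l) (t.drop l) = false := by
    intro l hl hl2
    have hl1 : 1 ≤ l := by omega
    have hln : l ≤ n := by omega
    have hA : isTwice (t.take l) t = false := hMmax l hl (by omega)
    cases hio : PySem.Chars.isIn (t.take l) (t.drop l) with
    | false => rfl
    | true =>
      have := (isTwice_iff t l hl1 hln).mpr ((isIn_iff t l).mp hio)
      rw [hA] at this
      exact absurd this (by simp)
  rw [bLoop_eq t (n / 2) M hMhalf hBQ hBmax]

-- ===== VERDICT (by name: the statement is the Claim_ definition above) =====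
theorem sameEnds_spec : Claim_equal_sameEnds := by
  intro text _
  unfold Spec_sameEnds sameEnds sameEnds_alt
  exact congrArg String.mk (main_eq text.toList)
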